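-- pv_equiv track=rewrite | github.com/G26karthik/UML-Designer | python-parser/analyzers/cpp_analyzer.py | _extract_class_content
-- ===== SOURCE A (Python) =====
-- def _extract_class_content(source: str, start_pos: int) -> str:
--     """
--     Extract class/struct body by matching braces.
--
--     Args:
--         source: Source code
--         start_pos: Position to start from
--
--     Returns:
--         Class body text
--     """
--     # Find opening brace
--     brace_start = source.find('{', start_pos)
--     if brace_start == -1:
--         return ""
--
--     # Match braces
--     brace_count = 1
--     pos = brace_start + 1
--
--     while pos < len(source) and brace_count > 0:
--         if source[pos] == '{':
--             brace_count += 1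
--         elif source[pos] == '}':
--             brace_count -= 1
--         pos += 1
--
--     if brace_count == 0:
--         return source[brace_start:pos]
--
--     return ""
-- ===== SOURCE B (Python) =====
-- def _extract_class_content(source: str, start_pos: int) -> str:
--     # Skip from brace to brace with str.find instead of scanning every character.
--     brace_start = source.find('{', start_pos)
--     if brace_start == -1:
--         return ""
--     depth = 1
--     cursor = brace_start + 1
--     while True:
--         o = source.find('{', cursor)
--         c = source.find('}', cursor)
--         if c == -1:
--             return ""
--         if o != -1 and o < c:
--             depth += 1
--             cursor = o + 1
--         else:
--             depth -= 1
--             if depth == 0: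
--                 return source[brace_start:c + 1]
--             cursor = c + 1
-- ===== Notes on version B (the rewrite author's own statement) =====
-- stated objective: alternative
-- what changed: Instead of scanning every character while tracking brace depth, B repeatedly uses str.find to jump directly to the next '{' or '}' (whichever is nearer), updating the depth only at braces.
import Mathlib
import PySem

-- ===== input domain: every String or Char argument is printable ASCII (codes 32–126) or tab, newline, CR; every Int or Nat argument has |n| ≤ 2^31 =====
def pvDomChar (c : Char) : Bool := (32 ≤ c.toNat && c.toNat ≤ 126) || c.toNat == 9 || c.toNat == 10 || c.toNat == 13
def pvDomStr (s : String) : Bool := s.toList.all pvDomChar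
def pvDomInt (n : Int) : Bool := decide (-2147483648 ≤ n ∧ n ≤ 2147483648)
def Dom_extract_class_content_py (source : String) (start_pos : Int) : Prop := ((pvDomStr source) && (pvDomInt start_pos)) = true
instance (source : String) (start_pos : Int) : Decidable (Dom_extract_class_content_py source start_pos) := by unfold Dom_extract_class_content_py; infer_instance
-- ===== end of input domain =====

-- B replaces A's character-by-character scan by repeated str.find jumps from brace to brace (same return value).

-- ===== PORT A =====
-- A's while loop: pos advances one character at a time, count tracks brace depth.
def aLoopF (l : List Char) : Nat → Nat → Int → Nat × Int
  | 0, pos, count => (pos, count)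
  | fuel + 1, pos, count =>
    if h : pos < l.length ∧ 0 < count then
      let ch := l[pos]'h.1
      aLoopF l fuel (pos + 1) (if ch = '{' then count + 1 else if ch = '}' then count - 1 else count)
    else (pos, count)

def aLoop (l : List Char) (pos : Nat) (count : Int) : Nat × Int :=
  aLoopF l (l.length - pos) pos count

def extract_class_content_py (source : String) (start_pos : Int) : String :=
  let braceStart := PySem.Chars.findFrom source.toList ['{'] start_pos none
  if braceStart = -1 then ""
  else
    let r := aLoop source.toList (braceStart.toNat + 1) 1
    if r.2 = 0 then String.ofList (PySem.List.slice source.toList (some braceStart) (some (r.1 : Int)))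
    else ""

-- ===== PORT B =====
-- B's loop: jump to the nearer of the next '{' / '}'. The fuel argument only makes the
-- recursion structural; cursor strictly increases, so fuel = len + 1 - cursor never runs out.
def bLoopF (l : List Char) (braceStart : Nat) : Nat → Nat → Int → String
  | 0, _, _ => ""
  | fuel + 1, cursor, depth =>
    let o := PySem.Chars.findFrom l ['{'] (cursor : Int) none
    let c := PySem.Chars.findFrom l ['}'] (cursor : Int) none
    if c = -1 then ""
    else if o ≠ -1 ∧ o < c then
      bLoopF l braceStart fuel (o.toNat + 1) (depth + 1)
    else if depth - 1 = 0 then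
      String.ofList (PySem.List.slice l (some (braceStart : Int)) (some (c + 1)))
    else
      bLoopF l braceStart fuel (c.toNat + 1) (depth - 1)

def extract_class_content_py_alt (source : String) (start_pos : Int) : String :=
  let l := source.toList
  let braceStart := PySem.Chars.findFrom l ['{'] start_pos none
  if braceStart = -1 then ""
  else bLoopF l braceStart.toNat (l.length - braceStart.toNat) (braceStart.toNat + 1) 1

-- ===== PRECONDITION & SPEC =====
def Spec_extract_class_content_py (source : String) (start_pos : Int) (out : String) : Prop := out = extract_class_content_py_alt source start_pos
instance (source : String) (start_pos : Int) (out : String) : Decidable (Spec_extract_class_content_py source start_pos out) := by unfold Spec_extract_class_content_py; infer_instance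

-- ===== CLAIM (what is proved, stated in full; the proofs are below) =====
def Claim_equal_extract_class_content_py : Prop := ∀ (source : String) (start_pos : Int), Dom_extract_class_content_py source start_pos → Spec_extract_class_content_py source start_pos (extract_class_content_py source start_pos)

-- ===== LEMMAS AND PROOFS =====

lemma findFrom_found_spec (l sub : List Char) (st : Int) (hsub : sub ≠ [])
    (h : PySem.Chars.findFrom l sub st none ≠ -1) :
    0 ≤ PySem.Chars.findFrom l sub st none ∧
    (PySem.Chars.findFrom l sub st none).toNat < l.length ∧
    sub <+: l.drop (PySem.Chars.findFrom l sub st none).toNat := by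
  simp only [PySem.Chars.findFrom, Int.toNat_natCast, List.take_length] at h ⊢
  set st' : Int := (if st < 0 then if st + (l.length : Int) < 0 then 0 else st + (l.length : Int) else st) with hst'
  have hst0 : 0 ≤ st' := by rw [hst']; split_ifs <;> omega
  split_ifs at h ⊢ with h1 h2
  · exact absurd rfl h
  · exact absurd rfl h
  · set r : Int := PySem.Chars.find (List.drop st'.toNat l) sub with hr
    have hrm : -1 ≤ r := hr ▸ PySem.Chars.neg_one_le_find (List.drop st'.toNat l) sub
    have hr0 : 0 ≤ r := by omega
    have hspec := (PySem.Chars.find_spec (s := List.drop st'.toNat l) (sub := sub) (hr ▸ hr0)).1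
    rw [← hr, List.drop_drop] at hspec
    have htn : (st' + r).toNat = st'.toNat + r.toNat := by omega
    have hpre : sub <+: List.drop ((st' + r).toNat) l := by rw [htn]; exact hspec
    refine ⟨by omega, ?_, hpre⟩
    have hlen := hpre.length_le
    have hs : 0 < sub.length := List.length_pos_iff.mpr hsub
    rw [List.length_drop] at hlen
    omega

lemma singleton_prefix_drop (l : List Char) (a : Char) (i : Nat) (hi : i < l.length) :
    ([a] <+: l.drop i) ↔ l[i] = a := by
  rw [List.drop_eq_getElem_cons hi]
  constructor
  · rintro ⟨t, ht⟩; injection ht with h1 _; exact h1.symm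
  · rintro rfl; exact ⟨l.drop (i + 1), rfl⟩

lemma no_occ_of_findFrom_neg (l : List Char) (a : Char) (cursor : Nat) (hc : cursor ≤ l.length)
    (h : PySem.Chars.findFrom l [a] (cursor : Int) none = -1) :
    ∀ j, cursor ≤ j → (hj : j < l.length) → l[j] ≠ a := by
  intro j hj hjl hx
  apply (PySem.Chars.findFrom_natCast_eq_neg_one_iff l [a] cursor hc).mp h
  have hpre : [a] <+: l.drop j := (singleton_prefix_drop l a j hjl).mpr hx
  have hdj : l.drop j = List.drop (j - cursor) (l.drop cursor) := by
    rw [List.drop_drop]; congr 1; omega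
  rw [hdj] at hpre
  exact hpre.isInfix.trans (List.drop_suffix _ _).isInfix

lemma no_occ_before_findFrom (l : List Char) (a : Char) (cursor : Nat) (hc : cursor ≤ l.length)
    (h : PySem.Chars.findFrom l [a] (cursor : Int) none ≠ -1) :
    ∀ j, cursor ≤ j → j < (PySem.Chars.findFrom l [a] (cursor : Int) none).toNat →
      (hj : j < l.length) → l[j] ≠ a := by
  intro j h1 h2 hj hx
  exact (PySem.Chars.findFrom_natCast_spec l [a] cursor hc h).2.2 j h1 h2
    ((singleton_prefix_drop l a j hj).mpr hx)

lemma aLoop_stop (l : List Char) (pos : Nat) (count : Int)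
    (h : ¬ (pos < l.length ∧ 0 < count)) : aLoop l pos count = (pos, count) := by
  unfold aLoop
  cases hf : l.length - pos with
  | zero => rfl
  | succ n => simp [aLoopF, h]

lemma aLoop_step (l : List Char) (pos : Nat) (count : Int) (h1 : pos < l.length) (h2 : 0 < count) :
    aLoop l pos count =
      aLoop l (pos + 1)
        (if l[pos] = '{' then count + 1 else if l[pos] = '}' then count - 1 else count) := by
  unfold aLoop
  have hf : l.length - pos = (l.length - (pos + 1)) + 1 := by omega
  rw [hf]
  simp [aLoopF, h1, h2]

-- if no '}' occurs at or after pos, the depth never decreases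
lemma aLoop_no_close (l : List Char) (pos : Nat) (count : Int)
    (h : ∀ i, pos ≤ i → (hi : i < l.length) → l[i] ≠ '}') :
    count ≤ (aLoop l pos count).2 := by
  by_cases hg : pos < l.length ∧ 0 < count
  · rw [aLoop_step l pos count hg.1 hg.2]
    have hne : l[pos]'hg.1 ≠ '}' := h pos le_rfl hg.1
    rw [if_neg hne]
    by_cases hb : l[pos]'hg.1 = '{'
    · rw [if_pos hb]
      have := aLoop_no_close l (pos + 1) (count + 1) (fun i hi => h i (by omega))
      omega
    · rw [if_neg hb]
      exact aLoop_no_close l (pos + 1) count (fun i hi => h i (by omega))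
  · rw [aLoop_stop l pos count hg]
termination_by l.length - pos
decreasing_by all_goals omega

-- scanning a brace-free stretch leaves the state unchanged
lemma aLoop_skip_to (l : List Char) (pos k : Nat) (count : Int) (h2 : 0 < count)
    (hk : pos + k ≤ l.length)
    (h : ∀ i, pos ≤ i → i < pos + k → (hi : i < l.length) → l[i] ≠ '{' ∧ l[i] ≠ '}') :
    aLoop l pos count = aLoop l (pos + k) count := by
  induction k generalizing pos with
  | zero => rfl
  | succ n ih =>
    have h1 : pos < l.length := by omega
    have hch := h pos le_rfl (by omega) h1
    rw [aLoop_step l pos count h1 h2, if_neg hch.1, if_neg hch.2]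
    have := ih (pos + 1) (by omega) (fun i hi1 hi2 => h i (by omega) (by omega))
    rw [this]
    congr 1
    omega

-- main correspondence: B's find-skipping loop returns exactly what A's scan yields
lemma bLoopF_eq (l : List Char) (bs fuel : Nat) :
    ∀ (cursor : Nat) (depth : Int), cursor ≤ l.length → l.length + 1 - cursor ≤ fuel →
      0 < depth →
    bLoopF l bs fuel cursor depth =
      (if (aLoop l cursor depth).2 = 0 then
         String.ofList (PySem.List.slice l (some (bs : Int)) (some ((aLoop l cursor depth).1 : Int)))
       else "") := by
  induction fuel with
  | zero => intro cursor depth hc hf hd; exact absurd hf (by omega)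
  | succ n ih =>
    intro cursor depth hc hf hd
    simp only [bLoopF]
    by_cases hcc : PySem.Chars.findFrom l ['}'] (cursor : Int) none = -1
    · rw [if_pos hcc]
      have hmono := aLoop_no_close l cursor depth (no_occ_of_findFrom_neg l '}' cursor hc hcc)
      rw [if_neg (by omega)]
    · rw [if_neg hcc]
      set o := PySem.Chars.findFrom l ['{'] (cursor : Int) none with hodef
      set c := PySem.Chars.findFrom l ['}'] (cursor : Int) none with hcdef
      have hcs := findFrom_found_spec l ['}'] (cursor : Int) (by simp) hcc
      have hcge := (PySem.Chars.findFrom_natCast_spec l ['}'] cursor hc hcc).1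
      have hcat : l[c.toNat]'hcs.2.1 = '}' :=
        (singleton_prefix_drop l '}' c.toNat hcs.2.1).mp hcs.2.2
      by_cases ho : o ≠ -1 ∧ o < c
      · rw [if_pos ho]
        have hos := findFrom_found_spec l ['{'] (cursor : Int) (by simp) ho.1
        have hoge := (PySem.Chars.findFrom_natCast_spec l ['{'] cursor hc ho.1).1
        have hoat : l[o.toNat]'hos.2.1 = '{' :=
          (singleton_prefix_drop l '{' o.toNat hos.2.1).mp hos.2.2
        have hcn : cursor ≤ o.toNat := by omega
        have holtc : o.toNat < c.toNat := by omega
        -- skip the brace-free stretch [cursor, o.toNat)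
        have hskip := aLoop_skip_to l cursor (o.toNat - cursor) depth hd (by omega)
          (fun i hi1 hi2 hil => ⟨no_occ_before_findFrom l '{' cursor hc ho.1 i hi1 (by omega) hil,
                                no_occ_before_findFrom l '}' cursor hc hcc i hi1 (by omega) hil⟩)
        have hpos : cursor + (o.toNat - cursor) = o.toNat := by omega
        rw [hpos] at hskip
        rw [hskip, aLoop_step l o.toNat depth hos.2.1 hd, hoat, if_pos rfl]
        exact ih (o.toNat + 1) (depth + 1) (by omega) (by omega) (by omega)
      · rw [if_neg ho]
        -- the nearest brace at or after cursor is the '}' at c.toNat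
        have hnoopen : ∀ i, cursor ≤ i → i < c.toNat → (hi : i < l.length) → l[i] ≠ '{' := by
          intro i hi1 hi2 hil
          by_cases hon : o = -1
          · exact no_occ_of_findFrom_neg l '{' cursor hc (hodef ▸ hon) i hi1 hil
          · have hco : c ≤ o := by
              rcases not_and_or.mp ho with h' | h'
              · exact absurd (of_not_not h') hon
              · omega
            exact no_occ_before_findFrom l '{' cursor hc hon i hi1 (by omega) hil
        have hskip := aLoop_skip_to l cursor (c.toNat - cursor) depth hd (by omega)
          (fun i hi1 hi2 hil => ⟨hnoopen i hi1 (by omega) hil,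
                                no_occ_before_findFrom l '}' cursor hc hcc i hi1 (by omega) hil⟩)
        have hpos : cursor + (c.toNat - cursor) = c.toNat := by omega
        rw [hpos] at hskip
        have hchar : (l[c.toNat]'hcs.2.1) ≠ '{' := by rw [hcat]; decide
        rw [hskip, aLoop_step l c.toNat depth hcs.2.1 hd, if_neg hchar, if_pos hcat]
        by_cases hz : depth - 1 = 0
        · rw [if_pos hz, hz, aLoop_stop l (c.toNat + 1) 0 (by simp)]
          rw [if_pos rfl]
          have hcast : ((c.toNat + 1 : Nat) : Int) = c + 1 := by omega
          rw [hcast]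
        · rw [if_neg hz]
          exact ih (c.toNat + 1) (depth - 1) (by omega) (by omega) (by omega)

-- ===== VERDICT (by name: the statement is the Claim_ definition above) =====
theorem extract_class_content_py_spec : Claim_equal_extract_class_content_py := by
  intro source start_pos _
  unfold Spec_extract_class_content_py
  simp only [extract_class_content_py, extract_class_content_py_alt]
  by_cases h : PySem.Chars.findFrom source.toList ['{'] start_pos none = -1
  · rw [if_pos h, if_pos h]
  · rw [if_neg h, if_neg h]
    have hs := findFrom_found_spec source.toList ['{'] start_pos (by simp) h
    rw [bLoopF_eq source.toList (PySem.Chars.findFrom source.toList ['{'] start_pos none).toNat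
        (source.toList.length - (PySem.Chars.findFrom source.toList ['{'] start_pos none).toNat)
        ((PySem.Chars.findFrom source.toList ['{'] start_pos none).toNat + 1) 1
        (by omega) (by omega) (by omega)]
    rw [Int.toNat_of_nonneg hs.1]
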